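-- pv_equiv track=rewrite | github.com/saisankar20/MakingLeetcodeMyBitch | 775tle.py | isIdealPermutation
-- ===== SOURCE A (Python) =====
-- from typing import List
--
-- def isIdealPermutation(nums: List[int]) -> bool:
--     Gcount = 0
--     Lcount = 0
--     n = len(nums)
--
--     for i in range(n):
--         for j in range(i+1 , n):
--             if nums[i] > nums[j]:
--                 Gcount += 1
--
--     for i in range(n - 1):
--         if nums[i] > nums[i+1]:
--             Lcount += 1
--
--     if Gcount == Lcount:
--         return True
--     else:
--          return False
-- ===== SOURCE B (Python) =====
-- from typing import List
--
-- def isIdealPermutation(nums: List[int]) -> bool: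
--     # Global inversions equal local inversions iff there is no inversion at
--     # distance >= 2, i.e. no index i with nums[i] < max(nums[:i-1]).
--     # One pass with a running maximum of the prefix two positions back.
--     if len(nums) < 2:
--         return True
--     mx, prev = nums[0], nums[1]
--     for x in nums[2:]:
--         if x < mx:
--             return False
--         if prev > mx:
--             mx = prev
--         prev = x
--     return True
-- ===== Notes on version B (the rewrite author's own statement) =====
-- stated objective: faster
-- what changed: Replaced the O(n^2) double loop counting all inversions (and comparing with the adjacent-inversion count) by a single pass that keeps the running maximum of the prefix ending two positions back and fails as soon as some element is smaller than it, since the two counts are equal exactly when no inversion spans distance >= 2.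
import Mathlib
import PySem

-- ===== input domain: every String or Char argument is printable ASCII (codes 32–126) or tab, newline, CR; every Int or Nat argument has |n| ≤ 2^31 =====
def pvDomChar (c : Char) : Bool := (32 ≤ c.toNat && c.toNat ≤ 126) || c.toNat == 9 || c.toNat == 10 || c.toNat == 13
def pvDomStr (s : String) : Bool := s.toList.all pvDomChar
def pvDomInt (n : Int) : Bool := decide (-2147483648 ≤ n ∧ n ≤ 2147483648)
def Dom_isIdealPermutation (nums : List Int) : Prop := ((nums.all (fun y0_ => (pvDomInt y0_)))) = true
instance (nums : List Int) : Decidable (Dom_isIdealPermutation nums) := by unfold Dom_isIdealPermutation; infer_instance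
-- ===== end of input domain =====

-- B replaces A's O(n^2) double-loop inversion count with a single running-maximum pass (the two counts are equal iff no inversion spans distance >= 2).


-- ===== PORT A =====
def isIdealPermutation (nums : List Int) : Bool :=
  let n : Int := nums.length
  let gcount : Int := (PySem.List.pyRange 0 n 1).foldl (fun g i =>
      (PySem.List.pyRange (i+1) n 1).foldl (fun g j =>
        if PySem.List.pyGetD nums j 0 < PySem.List.pyGetD nums i 0 then g + 1 else g) g) 0
  let lcount : Int := (PySem.List.pyRange 0 (n-1) 1).foldl (fun l i =>
      if PySem.List.pyGetD nums (i+1) 0 < PySem.List.pyGetD nums i 0 then l + 1 else l) 0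
  if gcount == lcount then true else false

-- ===== PORT B =====
-- the loop of Source B: state (mx, prev); the early `return False` is the `false` branch
def altGo (mx prev : Int) : List Int → Bool
  | [] => true
  | x :: rest => if x < mx then false else altGo (if mx < prev then prev else mx) x rest

def isIdealPermutation_alt (nums : List Int) : Bool :=
  match nums with
  | a :: b :: rest => altGo a b rest
  | _ => true

-- ===== PRECONDITION & SPEC =====
def Spec_isIdealPermutation (nums : List Int) (out : Bool) : Prop := out = isIdealPermutation_alt nums
instance (nums : List Int) (out : Bool) : Decidable (Spec_isIdealPermutation nums out) := by unfold Spec_isIdealPermutation; infer_instance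

-- ===== CLAIM (what is proved, stated in full; the proofs are below) =====
def Claim_equal_isIdealPermutation : Prop := ∀ (nums : List Int), Dom_isIdealPermutation nums → Spec_isIdealPermutation nums (isIdealPermutation nums)

-- ===== LEMMAS AND PROOFS =====

-- number of global inversions (A's Gcount), structurally
def invCnt : List Int → Nat
  | [] => 0
  | x :: xs => xs.countP (fun y => decide (y < x)) + invCnt xs

-- number of adjacent (local) inversions (A's Lcount)
def locCnt : List Int → Nat
  | [] => 0
  | [_] => 0
  | x :: y :: xs => (if y < x then 1 else 0) + locCnt (y :: xs)

-- number of inversions spanning distance ≥ 2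
def farCnt : List Int → Nat
  | [] => 0
  | [_] => 0
  | x :: y :: xs => xs.countP (fun z => decide (z < x)) + farCnt (y :: xs)

theorem invCnt_eq (xs : List Int) : invCnt xs = locCnt xs + farCnt xs := by
  induction xs with
  | nil => rfl
  | cons x t ih =>
    cases t with
    | nil => rfl
    | cons y s =>
      simp only [invCnt, locCnt, farCnt, List.countP_cons] at *
      by_cases hyx : y < x <;> simp [hyx] at * <;> omega

theorem sumInvAux (nums : List Int) :
    ((List.range nums.length).map (fun k =>
      ((nums.drop (k+1)).countP (fun y => decide (y < nums.getD k 0)) : Int))).sum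
    = (invCnt nums : Int) := by
  induction nums with
  | nil => rfl
  | cons x t ih =>
    simp only [List.length_cons, List.range_succ_eq_map, List.map_cons, List.map_map,
      List.sum_cons, invCnt]
    have h1 : ((x :: t).drop 1).countP (fun y => decide (y < (x :: t).getD 0 0))
        = t.countP (fun y => decide (y < x)) := by simp
    have h2 : (List.range t.length).map ((fun k =>
        (((x :: t).drop (k+1)).countP (fun y => decide (y < (x :: t).getD k 0)) : Int)) ∘ Nat.succ)
        = (List.range t.length).map (fun k =>
          ((t.drop (k+1)).countP (fun y => decide (y < t.getD k 0)) : Int)) := by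
      refine List.map_congr_left ?_
      intro k _
      simp [Function.comp, Nat.succ_eq_add_one, List.drop_succ_cons]
    rw [h1, h2, ih]
    push_cast
    ring

theorem sumLocAux (nums : List Int) :
    (List.range (nums.length - 1)).countP
      (fun k => decide (nums.getD (k+1) 0 < nums.getD k 0))
    = locCnt nums := by
  induction nums with
  | nil => rfl
  | cons x t ih =>
    cases t with
    | nil => rfl
    | cons y s =>
      rw [show (x :: y :: s).length - 1 = ((y :: s).length - 1) + 1 from rfl,
        List.range_succ_eq_map, List.countP_cons, List.countP_map]
      have hshift : (List.range ((y :: s).length - 1)).countP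
          ((fun k => decide ((x :: y :: s).getD (k+1) 0 < (x :: y :: s).getD k 0)) ∘ Nat.succ)
          = (List.range ((y :: s).length - 1)).countP
            (fun k => decide ((y :: s).getD (k+1) 0 < (y :: s).getD k 0)) := by
        refine List.countP_congr ?_
        intro k _
        simp [Function.comp, Nat.succ_eq_add_one, List.getElem?_cons_succ]
      rw [hshift, ih, locCnt]
      by_cases h : y < x
      · simp [h, Nat.add_comm]
      · simp [h]

theorem gcount_eq (nums : List Int) :
    (PySem.List.pyRange 0 (nums.length : Int) 1).foldl (fun g i =>
      (PySem.List.pyRange (i+1) (nums.length : Int) 1).foldl (fun g j =>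
        if PySem.List.pyGetD nums j 0 < PySem.List.pyGetD nums i 0 then g + 1 else g) g) (0 : Int)
    = (invCnt nums : Int) := by
  rw [PySem.List.foldl_congr_mem _ _
    (fun g i => g + (((nums.drop (i+1).toNat).countP (fun y => decide (y < PySem.List.pyGetD nums i 0))) : Int)) _
    (by
      intro acc i hi
      have h0 : (0:Int) ≤ i + 1 := by
        have := (PySem.List.mem_pyRange_one.mp hi).1; omega
      rw [PySem.List.foldl_pyRange_pyGetD' nums 0
        (fun g y => if y < PySem.List.pyGetD nums i 0 then g + 1 else g) acc h0,
        PySem.List.foldl_ite_add_one])]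
  rw [PySem.List.foldl_add]
  rw [PySem.List.pyRange_zero_nat, List.map_map]
  rw [show ((fun i => (((nums.drop (i+1).toNat).countP (fun y => decide (y < PySem.List.pyGetD nums i 0))) : Int)) ∘ (fun k : Nat => (k : Int)))
      = (fun k : Nat => ((nums.drop (k+1)).countP (fun y => decide (y < nums.getD k 0)) : Int)) from ?_]
  · rw [sumInvAux]; ring
  · funext k
    have h1 : ((k:Int)+1).toNat = k + 1 := by omega
    simp only [Function.comp_apply, h1, PySem.List.pyGetD_natCast]

theorem lcount_eq (nums : List Int) :
    (PySem.List.pyRange 0 ((nums.length : Int) - 1) 1).foldl (fun l i =>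
      if PySem.List.pyGetD nums (i+1) 0 < PySem.List.pyGetD nums i 0 then l + 1 else l) (0 : Int)
    = (locCnt nums : Int) := by
  cases nums with
  | nil =>
    rw [PySem.List.pyRange_one_eq_nil (by norm_num)]
    rfl
  | cons hd tl =>
  rw [PySem.List.foldl_ite_add_one]
  set nums := hd :: tl with hnums
  have hlen : ((nums.length : Int) - 1) = ((nums.length - 1 : Nat) : Int) := by
    simp [hnums]
  have hfun : ((fun i => decide (PySem.List.pyGetD nums (i+1) 0 < PySem.List.pyGetD nums i 0)) ∘ (fun k : Nat => (k : Int)))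
      = (fun k : Nat => decide (nums.getD (k+1) 0 < nums.getD k 0)) := by
    funext k
    have h1 : ((k:Int)+1) = ((k+1 : Nat) : Int) := by push_cast; ring
    simp only [Function.comp_apply, h1, PySem.List.pyGetD_natCast]
  rw [hlen, PySem.List.pyRange_zero_nat, List.countP_map, hfun, sumLocAux]
  ring

theorem A_eq_true_iff (nums : List Int) :
    isIdealPermutation nums = true ↔ farCnt nums = 0 := by
  unfold isIdealPermutation
  simp only []
  rw [gcount_eq, lcount_eq]
  have h := invCnt_eq nums
  constructor
  · intro hEq
    split at hEq
    · next hb =>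
      have : (invCnt nums : Int) = (locCnt nums : Int) := by exact_mod_cast beq_iff_eq.mp hb
      omega
    · exact absurd hEq (by simp)
  · intro hf
    have : (invCnt nums : Int) = (locCnt nums : Int) := by
      have : invCnt nums = locCnt nums := by omega
      exact_mod_cast this
    simp [this]

theorem altGo_eq_true_iff (rest : List Int) : ∀ mx prev : Int,
    (altGo mx prev rest = true ↔ ((∀ x ∈ rest, mx ≤ x) ∧ farCnt (prev :: rest) = 0)) := by
  induction rest with
  | nil => intro mx prev; simp [altGo, farCnt]
  | cons y s ih =>
    intro mx prev
    have hmaxle : ∀ x : Int, ((if mx < prev then prev else mx) ≤ x ↔ mx ≤ x ∧ prev ≤ x) := by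
      intro x; split <;> omega
    simp only [altGo]
    by_cases h : y < mx
    · simp only [if_pos h, Bool.false_eq_true, false_iff]
      rintro ⟨hall, -⟩
      exact absurd (hall y (by simp)) (not_le.mpr h)
    · rw [if_neg h, ih]
      simp only [farCnt, Nat.add_eq_zero_iff, List.countP_eq_zero, decide_eq_true_eq,
        List.mem_cons, forall_eq_or_imp, hmaxle, not_lt, forall_and]
      constructor
      · rintro ⟨⟨h1, h2⟩, hf⟩
        exact ⟨⟨not_lt.mp h, h1⟩, h2, hf⟩
      · rintro ⟨⟨-, h1⟩, h2, hf⟩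
        exact ⟨⟨h1, h2⟩, hf⟩

theorem alt_eq_true_iff (nums : List Int) :
    isIdealPermutation_alt nums = true ↔ farCnt nums = 0 := by
  match nums with
  | [] => simp [isIdealPermutation_alt, farCnt]
  | [a] => simp [isIdealPermutation_alt, farCnt]
  | a :: b :: rest =>
    show altGo a b rest = true ↔ _
    rw [altGo_eq_true_iff]
    simp only [farCnt, Nat.add_eq_zero_iff, List.countP_eq_zero, decide_eq_true_eq, not_lt]

-- ===== VERDICT (by name: the statement is the Claim_ definition above) =====
theorem isIdealPermutation_spec : Claim_equal_isIdealPermutation := by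
  intro nums _
  unfold Spec_isIdealPermutation
  have hA := A_eq_true_iff nums
  have hB := alt_eq_true_iff nums
  cases hA' : isIdealPermutation nums <;> cases hB' : isIdealPermutation_alt nums <;>
    simp_all
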